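-- pv_equiv track=rewrite | github.com/tysjosh/job-matching-contrastive-learning | llm_augmentation/downward_llm_transformer.py | _remove_seniority_prefix
-- ===== SOURCE A (Python) =====
-- def _remove_seniority_prefix(role: str) -> str:
--     """Remove seniority prefixes from a role title."""
--     seniority_prefixes = [
--         "senior ", "lead ", "principal ", "staff ", "chief ",
--         "head ", "director ", "vp ", "vice president "
--     ]
--
--     result = role
--     for prefix in seniority_prefixes:
--         if result.lower().startswith(prefix):
--             result = result[len(prefix):]
--             break
--
--     return result.strip()
-- ===== SOURCE B (Python) =====
-- _ONE_WORD = {"senior", "lead", "principal", "staff", "chief", "head", "director", "vp"}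
--
--
-- def _remove_seniority_prefix(role: str) -> str:
--     """Remove seniority prefixes from a role title (first-word lookup instead of a prefix scan)."""
--     low = role.lower()
--     i = low.find(" ")
--     if i >= 0:
--         first = low[:i]
--         if first in _ONE_WORD:
--             return role[i + 1:].strip()
--         if first == "vice" and low[i + 1:].startswith("president "):
--             return role[i + 1 + len("president "):].strip()
--     return role.strip()
-- ===== Notes on version B (the rewrite author's own statement) =====
-- stated objective: alternative
-- what changed: A scans nine lowercase prefixes with startswith; B lowers once, finds the first space, and looks the first word up in a set (with a two-word follow-up check only for 'vice president'), so the prefix list is never scanned.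
import Mathlib
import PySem

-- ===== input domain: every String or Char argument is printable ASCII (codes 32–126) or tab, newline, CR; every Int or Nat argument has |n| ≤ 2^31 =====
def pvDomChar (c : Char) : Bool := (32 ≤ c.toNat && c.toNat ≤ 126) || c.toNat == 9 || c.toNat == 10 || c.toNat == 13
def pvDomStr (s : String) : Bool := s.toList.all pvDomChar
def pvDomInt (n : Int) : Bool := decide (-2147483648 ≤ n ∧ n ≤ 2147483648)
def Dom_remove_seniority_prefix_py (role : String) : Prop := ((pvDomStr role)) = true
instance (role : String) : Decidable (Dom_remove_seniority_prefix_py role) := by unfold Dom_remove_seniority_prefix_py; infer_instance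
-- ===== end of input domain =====

-- B replaces A's scan over nine lowercase prefixes by one find of the first space and a
-- set lookup of the first word (objective: alternative; same return value, proved below).

-- ===== PORT A =====
def pvSeniorityPrefixes : List String :=
  ["senior ", "lead ", "principal ", "staff ", "chief ",
   "head ", "director ", "vp ", "vice president "]

-- the 'for prefix in seniority_prefixes: if …: result = result[len(prefix):]; break' loop
def pvStripLoop : List String → String → String
  | [], result => result
  | p :: ps, result =>
    if PySem.Str.startswith (PySem.Str.lower result) p then
      PySem.Str.slice result (some (PySem.Str.len p)) none
    else pvStripLoop ps result

def remove_seniority_prefix_py (role : String) : String :=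
  PySem.Str.strip (pvStripLoop pvSeniorityPrefixes role)

-- ===== PORT B =====
-- _ONE_WORD: Python set of the eight one-word prefixes (only membership is used)
def pvOneWord : List String :=
  ["senior", "lead", "principal", "staff", "chief", "head", "director", "vp"]

def remove_seniority_prefix_py_alt (role : String) : String :=
  if 0 ≤ PySem.Str.find (PySem.Str.lower role) " " then
    if pvOneWord.contains (PySem.Str.slice (PySem.Str.lower role) none (some (PySem.Str.find (PySem.Str.lower role) " "))) then
      PySem.Str.strip (PySem.Str.slice role (some (PySem.Str.find (PySem.Str.lower role) " " + 1)) none)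
    else if PySem.Str.slice (PySem.Str.lower role) none (some (PySem.Str.find (PySem.Str.lower role) " ")) == "vice"
         && PySem.Str.startswith (PySem.Str.slice (PySem.Str.lower role) (some (PySem.Str.find (PySem.Str.lower role) " " + 1)) none) "president " then
      PySem.Str.strip (PySem.Str.slice role (some (PySem.Str.find (PySem.Str.lower role) " " + 1 + 10)) none)
    else PySem.Str.strip role
  else PySem.Str.strip role

-- ===== PRECONDITION & SPEC =====
def Spec_remove_seniority_prefix_py (role : String) (out : String) : Prop := out = remove_seniority_prefix_py_alt role
instance (role : String) (out : String) : Decidable (Spec_remove_seniority_prefix_py role out) := by unfold Spec_remove_seniority_prefix_py; infer_instance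

-- ===== CLAIM (what is proved, stated in full; the proofs are below) =====
def Claim_equal_remove_seniority_prefix_py : Prop := ∀ (role : String), Dom_remove_seniority_prefix_py role → Spec_remove_seniority_prefix_py role (remove_seniority_prefix_py role)

-- ===== LEMMAS AND PROOFS =====

-- prefixes decompose: (p ++ q) <+: L ↔ p <+: L and q <+: L.drop |p|
theorem pv_append_prefix_iff (p q L : List Char) :
    (p ++ q) <+: L ↔ p <+: L ∧ q <+: L.drop p.length := by
  constructor
  · intro h
    obtain ⟨t, ht⟩ := h
    exact ⟨⟨q ++ t, by rw [← ht]; simp⟩, ⟨t, by rw [← ht]; simp⟩⟩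
  · rintro ⟨⟨t, ht⟩, ⟨u, hu⟩⟩
    refine ⟨u, ?_⟩
    rw [← ht] at hu ⊢
    simp at hu
    simp [hu]

-- For a space-free word w, "w ++ ' ' is a prefix of L" says exactly: the first space of L
-- sits at index |w| and L starts with w.
theorem pv_word_space_prefix_iff (w L : List Char) (hw : ' ' ∉ w) :
    (w ++ [' ']) <+: L ↔
      (PySem.Chars.find L [' '] = (w.length : Int) ∧ L.take w.length = w) := by
  constructor
  · intro h
    obtain ⟨t, ht⟩ := h
    have hL : L = w ++ ' ' :: t := by rw [← ht]; simp
    have htake : L.take w.length = w := by rw [hL]; exact List.take_left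
    have hdrop : L.drop w.length = ' ' :: t := by rw [hL]; exact List.drop_left
    have hinf : [' '] <:+: L :=
      (List.singleton_infix_iff ' ' L).mpr (by rw [hL]; simp)
    have hf0 : 0 ≤ PySem.Chars.find L [' '] := (PySem.Chars.find_nonneg_iff L [' ']).mpr hinf
    obtain ⟨hpre, hmin⟩ := PySem.Chars.find_spec hf0
    set n := (PySem.Chars.find L [' ']).toNat with hn
    have hle : n ≤ w.length := by
      by_contra hgt
      push Not at hgt
      exact hmin w.length hgt ⟨t, by rw [hdrop]; rfl⟩
    have hge : w.length ≤ n := by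
      by_contra hgt
      push Not at hgt
      obtain ⟨t', ht'⟩ := hpre
      have h2 : L.drop n = w.drop n ++ ' ' :: t := by
        rw [hL]; exact List.drop_append_of_le_length (le_of_lt hgt)
      rw [h2] at ht'
      cases hwd : w.drop n with
      | nil =>
        have := List.drop_eq_nil_iff.mp hwd
        omega
      | cons a u =>
        rw [hwd] at ht'
        have ha : ' ' = a := by simpa using congrArg List.head? ht'
        have hmem : a ∈ w := List.mem_of_mem_drop (by rw [hwd]; exact List.mem_cons_self)
        rw [← ha] at hmem
        exact hw hmem
    have hn' : n = w.length := le_antisymm hle hge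
    exact ⟨by omega, htake⟩
  · rintro ⟨hf, htake⟩
    have hf0 : 0 ≤ PySem.Chars.find L [' '] := by rw [hf]; positivity
    obtain ⟨hpre, -⟩ := PySem.Chars.find_spec hf0
    rw [hf] at hpre
    obtain ⟨t, ht⟩ := hpre
    refine ⟨t, ?_⟩
    conv_rhs => rw [← List.take_append_drop w.length L, htake]
    simp at ht
    rw [← ht]
    simp

-- if the piece before the first space looks like w, the space index is |w|
theorem pv_take_find_len (w L : List Char)
    (hf0 : 0 ≤ PySem.Chars.find L [' '])
    (h : L.take (PySem.Chars.find L [' ']).toNat = w) :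
    PySem.Chars.find L [' '] = (w.length : Int) := by
  have hle := PySem.Chars.find_le_length L [' ']
  have hlen : (L.take (PySem.Chars.find L [' ']).toNat).length = (PySem.Chars.find L [' ']).toNat := by
    simp; omega
  rw [h] at hlen
  omega

-- Str.find with " " on the list side
theorem pv_find_eq (role : String) :
    PySem.Str.find (PySem.Str.lower role) " " = PySem.Chars.find (PySem.Str.lower role).toList [' '] := by
  rw [PySem.Str.find_eq, show (" " : String).toList = [' '] from rfl]

-- the piece before the first space, on the list side
theorem pv_first_toList (role : String) (b : Int) (hb : 0 ≤ b) :
    (PySem.Str.slice (PySem.Str.lower role) none (some b)).toList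
      = (PySem.Str.lower role).toList.take b.toNat := by
  rw [PySem.Str.toList_slice, PySem.Chars.slice_eq_listSlice, PySem.List.slice_to _ hb]

-- B evaluated when the lowered role starts with (one-word w) ++ " "
theorem pv_alt_word (role w : String) (hw : ' ' ∉ w.toList)
    (hmem : pvOneWord.contains w = true)
    (h : (w.toList ++ [' ']) <+: (PySem.Str.lower role).toList) :
    remove_seniority_prefix_py_alt role
      = PySem.Str.strip (PySem.Str.slice role (some ((w.toList.length : Int) + 1)) none) := by
  obtain ⟨hf, htake⟩ := (pv_word_space_prefix_iff w.toList (PySem.Str.lower role).toList hw).mp h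
  have hfind : PySem.Str.find (PySem.Str.lower role) " " = (w.toList.length : Int) := by
    rw [pv_find_eq, hf]
  have hfirst : PySem.Str.slice (PySem.Str.lower role) none (some (w.toList.length : Int)) = w := by
    rw [← String.toList_inj, pv_first_toList role _ (by positivity)]
    simpa using htake
  unfold remove_seniority_prefix_py_alt
  rw [hfind, hfirst, if_pos (by positivity), if_pos (by simpa using hmem)]

-- B evaluated when the lowered role starts with "vice president "
theorem pv_alt_vice (role : String)
    (h : ("vice president " : String).toList <+: (PySem.Str.lower role).toList) :
    remove_seniority_prefix_py_alt role
      = PySem.Str.strip (PySem.Str.slice role (some 15) none) := by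
  have hsplit : ("vice president " : String).toList
      = (("vice" : String).toList ++ [' ']) ++ ("president " : String).toList := rfl
  rw [hsplit, pv_append_prefix_iff] at h
  obtain ⟨hp, hq⟩ := h
  obtain ⟨hf, htake⟩ := (pv_word_space_prefix_iff _ _ (by decide)).mp hp
  have hfind : PySem.Str.find (PySem.Str.lower role) " " = (4 : Int) := by
    rw [pv_find_eq, hf]; rfl
  have hfirst : PySem.Str.slice (PySem.Str.lower role) none (some (4 : Int)) = "vice" := by
    rw [← String.toList_inj, pv_first_toList role _ (by norm_num)]
    simpa using htake
  have hdrop : (PySem.Str.slice (PySem.Str.lower role) (some ((4 : Int) + 1)) none).toList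
      = (PySem.Str.lower role).toList.drop 5 := by
    rw [PySem.Str.toList_slice, PySem.Chars.slice_eq_listSlice, PySem.List.slice_from _ (by norm_num)]
    rfl
  have hpres : PySem.Str.startswith (PySem.Str.slice (PySem.Str.lower role) (some ((4 : Int) + 1)) none) "president " = true := by
    rw [PySem.Str.startswith_eq, PySem.Chars.startswith_iff, hdrop]
    simpa using hq
  unfold remove_seniority_prefix_py_alt
  rw [hfind, hfirst, if_pos (by norm_num), if_neg (by simp [pvOneWord]), if_pos (by rw [Bool.and_eq_true, beq_iff_eq]; exact ⟨rfl, hpres⟩)]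
  norm_num

-- B evaluated when no prefix of A's list matches
theorem pv_alt_nomatch (role : String)
    (h : ∀ p ∈ pvSeniorityPrefixes, ¬ p.toList <+: (PySem.Str.lower role).toList) :
    remove_seniority_prefix_py_alt role = PySem.Str.strip role := by
  unfold remove_seniority_prefix_py_alt
  by_cases hf0 : 0 ≤ PySem.Str.find (PySem.Str.lower role) " "
  · rw [if_pos hf0]
    have hf0' : 0 ≤ PySem.Chars.find (PySem.Str.lower role).toList [' '] := by
      rw [← pv_find_eq]; exact hf0
    have hfirst : (PySem.Str.slice (PySem.Str.lower role) none (some (PySem.Str.find (PySem.Str.lower role) " "))).toList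
        = (PySem.Str.lower role).toList.take (PySem.Chars.find (PySem.Str.lower role).toList [' ']).toNat := by
      rw [pv_first_toList role _ hf0, pv_find_eq]
    have hword : ∀ w : String, ' ' ∉ w.toList → (w ++ " ") ∈ pvSeniorityPrefixes →
        PySem.Str.slice (PySem.Str.lower role) none (some (PySem.Str.find (PySem.Str.lower role) " ")) ≠ w := by
      intro w hwsp hpmem heq
      have htake : (PySem.Str.lower role).toList.take (PySem.Chars.find (PySem.Str.lower role).toList [' ']).toNat = w.toList := by
        rw [← hfirst, heq]
      have hfw := pv_take_find_len w.toList _ hf0' htake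
      refine h (w ++ " ") hpmem ?_
      have hsp : (w ++ " ").toList = w.toList ++ [' '] := by simp
      rw [hsp]
      have hn : (PySem.Chars.find (PySem.Str.lower role).toList [' ']).toNat = w.toList.length := by omega
      refine (pv_word_space_prefix_iff w.toList _ hwsp).mpr ⟨hfw, ?_⟩
      rw [← hn]
      exact htake
    rw [if_neg, if_neg]
    · -- the vice-president branch is off
      intro hv
      simp only [Bool.and_eq_true, beq_iff_eq] at hv
      obtain ⟨hvice, hpres⟩ := hv
      have htake : (PySem.Str.lower role).toList.take (PySem.Chars.find (PySem.Str.lower role).toList [' ']).toNat = ("vice" : String).toList := by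
        rw [← hfirst, hvice]
      have hfw := pv_take_find_len ("vice" : String).toList _ hf0' htake
      refine h "vice president " (by simp [pvSeniorityPrefixes]) ?_
      have hsplit : ("vice president " : String).toList
          = (("vice" : String).toList ++ [' ']) ++ ("president " : String).toList := rfl
      rw [hsplit, pv_append_prefix_iff]
      have hfind : PySem.Str.find (PySem.Str.lower role) " " = (4 : Int) := by
        rw [pv_find_eq, hfw]; rfl
      have hn : (PySem.Chars.find (PySem.Str.lower role).toList [' ']).toNat = ("vice" : String).toList.length := by
        omega
      have htake' : (PySem.Str.lower role).toList.take ("vice" : String).toList.length = ("vice" : String).toList := by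
        rw [← hn]; exact htake
      refine ⟨(pv_word_space_prefix_iff _ _ (by decide)).mpr ⟨hfw, htake'⟩, ?_⟩
      have hdrop : (PySem.Str.slice (PySem.Str.lower role) (some (PySem.Str.find (PySem.Str.lower role) " " + 1)) none).toList
          = (PySem.Str.lower role).toList.drop 5 := by
        rw [PySem.Str.toList_slice, PySem.Chars.slice_eq_listSlice, hfind,
            PySem.List.slice_from _ (by norm_num)]
        rfl
      rw [PySem.Str.startswith_eq, PySem.Chars.startswith_iff, hdrop] at hpres
      simpa using hpres
    · -- the set lookup fails
      intro hc
      simp only [pvOneWord, List.contains_eq_mem, List.mem_cons, List.not_mem_nil, or_false,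
        decide_eq_true_eq] at hc
      rcases hc with h1 | h1 | h1 | h1 | h1 | h1 | h1 | h1 <;>
        first
        | exact hword "senior" (by decide) (by simp [pvSeniorityPrefixes]) h1
        | exact hword "lead" (by decide) (by simp [pvSeniorityPrefixes]) h1
        | exact hword "principal" (by decide) (by simp [pvSeniorityPrefixes]) h1
        | exact hword "staff" (by decide) (by simp [pvSeniorityPrefixes]) h1
        | exact hword "chief" (by decide) (by simp [pvSeniorityPrefixes]) h1
        | exact hword "head" (by decide) (by simp [pvSeniorityPrefixes]) h1
        | exact hword "director" (by decide) (by simp [pvSeniorityPrefixes]) h1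
        | exact hword "vp" (by decide) (by simp [pvSeniorityPrefixes]) h1
  · rw [if_neg hf0]

-- A's branch condition, stated on lists
theorem pv_cond_iff (role p : String) :
    PySem.Str.startswith (PySem.Str.lower role) p = true ↔ p.toList <+: (PySem.Str.lower role).toList := by
  rw [PySem.Str.startswith_eq, PySem.Chars.startswith_iff]

-- ===== VERDICT (by name: the statement is the Claim_ definition above) =====
set_option maxHeartbeats 2000000 in
theorem remove_seniority_prefix_py_spec : Claim_equal_remove_seniority_prefix_py := by
  intro role _
  unfold Spec_remove_seniority_prefix_py remove_seniority_prefix_py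
  simp only [pvSeniorityPrefixes, pvStripLoop]
  by_cases h1 : PySem.Str.startswith (PySem.Str.lower role) "senior " = true
  · rw [if_pos h1, pv_alt_word role "senior" (by decide) (by decide)
        (by rw [pv_cond_iff] at h1; simpa using h1)]
    norm_num [show ("senior " : String).length = 7 from rfl,
      show ("senior" : String).toList.length = 6 from rfl]
  rw [if_neg h1]
  by_cases h2 : PySem.Str.startswith (PySem.Str.lower role) "lead " = true
  · rw [if_pos h2, pv_alt_word role "lead" (by decide) (by decide)
        (by rw [pv_cond_iff] at h2; simpa using h2)]
    norm_num [show ("lead " : String).length = 5 from rfl,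
      show ("lead" : String).toList.length = 4 from rfl]
  rw [if_neg h2]
  by_cases h3 : PySem.Str.startswith (PySem.Str.lower role) "principal " = true
  · rw [if_pos h3, pv_alt_word role "principal" (by decide) (by decide)
        (by rw [pv_cond_iff] at h3; simpa using h3)]
    norm_num [show ("principal " : String).length = 10 from rfl,
      show ("principal" : String).toList.length = 9 from rfl]
  rw [if_neg h3]
  by_cases h4 : PySem.Str.startswith (PySem.Str.lower role) "staff " = true
  · rw [if_pos h4, pv_alt_word role "staff" (by decide) (by decide)
        (by rw [pv_cond_iff] at h4; simpa using h4)]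
    norm_num [show ("staff " : String).length = 6 from rfl,
      show ("staff" : String).toList.length = 5 from rfl]
  rw [if_neg h4]
  by_cases h5 : PySem.Str.startswith (PySem.Str.lower role) "chief " = true
  · rw [if_pos h5, pv_alt_word role "chief" (by decide) (by decide)
        (by rw [pv_cond_iff] at h5; simpa using h5)]
    norm_num [show ("chief " : String).length = 6 from rfl,
      show ("chief" : String).toList.length = 5 from rfl]
  rw [if_neg h5]
  by_cases h6 : PySem.Str.startswith (PySem.Str.lower role) "head " = true
  · rw [if_pos h6, pv_alt_word role "head" (by decide) (by decide)
        (by rw [pv_cond_iff] at h6; simpa using h6)]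
    norm_num [show ("head " : String).length = 5 from rfl,
      show ("head" : String).toList.length = 4 from rfl]
  rw [if_neg h6]
  by_cases h7 : PySem.Str.startswith (PySem.Str.lower role) "director " = true
  · rw [if_pos h7, pv_alt_word role "director" (by decide) (by decide)
        (by rw [pv_cond_iff] at h7; simpa using h7)]
    norm_num [show ("director " : String).length = 9 from rfl,
      show ("director" : String).toList.length = 8 from rfl]
  rw [if_neg h7]
  by_cases h8 : PySem.Str.startswith (PySem.Str.lower role) "vp " = true
  · rw [if_pos h8, pv_alt_word role "vp" (by decide) (by decide)
        (by rw [pv_cond_iff] at h8; simpa using h8)]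
    norm_num [show ("vp " : String).length = 3 from rfl,
      show ("vp" : String).toList.length = 2 from rfl]
  rw [if_neg h8]
  by_cases h9 : PySem.Str.startswith (PySem.Str.lower role) "vice president " = true
  · rw [if_pos h9, pv_alt_vice role ((pv_cond_iff role "vice president ").mp h9)]
    norm_num [show ("vice president " : String).length = 15 from rfl]
  rw [if_neg h9]
  rw [pv_alt_nomatch role ?_]
  intro p hp
  simp only [pvSeniorityPrefixes, List.mem_cons, List.not_mem_nil, or_false] at hp
  rcases hp with rfl | rfl | rfl | rfl | rfl | rfl | rfl | rfl | rfl <;>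
    rw [← pv_cond_iff] <;> assumption
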